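-- pv_equiv track=rewrite | github.com/2792000/PyCrypt | fonction.py | produitMatrice
-- ===== SOURCE A (Python) =====
-- def produitMatrice(l,key):
--     newm=[]
--     m=len(key)
--     p=len(l)
--     for i in range(p):
--         md=l[i]
--         md2=[]
--         for j in range(m):
--             md1=0
--             for k in range(m):
--                 md1=md1+key[j][k]*md[k]
--             md2.append(md1)
--         newm.append(md2)
--     for i in range(p):
--         for j in range(m):
--             if l[i][j]==0:
--                 newm[i][j]=0
--
--     return newm
-- ===== SOURCE B (Python) =====
-- def produitMatrice(l, key):
--     if not l:
--         return []
--     m = len(key)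
--     # columns of key, built once: cols[k][j] == key[j][k]
--     cols = [[key[j][k] for j in range(m)] for k in range(m)]
--     out = []
--     for row in l:
--         # accumulate the product row as a linear combination of key's columns
--         acc = [0] * m
--         for k in range(m):
--             c = row[k]
--             if c != 0:
--                 col = cols[k]
--                 for j in range(m):
--                     acc[j] += c * col[j]
--         out.append([0 if row[j] == 0 else acc[j] for j in range(m)])
--     return out
-- ===== Notes on version B (the rewrite author's own statement) =====
-- stated objective: alternative
-- what changed: A computes each output entry as an independent dot product of a key row with the input row and then mutates masked entries to 0 in a second nested pass; B transposes key once and builds each product row as a running linear combination of key's columns (axpy accumulation, outer loop over k, skipping zero coefficients), then emits the masked row directly with no mutation pass.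
import Mathlib
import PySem

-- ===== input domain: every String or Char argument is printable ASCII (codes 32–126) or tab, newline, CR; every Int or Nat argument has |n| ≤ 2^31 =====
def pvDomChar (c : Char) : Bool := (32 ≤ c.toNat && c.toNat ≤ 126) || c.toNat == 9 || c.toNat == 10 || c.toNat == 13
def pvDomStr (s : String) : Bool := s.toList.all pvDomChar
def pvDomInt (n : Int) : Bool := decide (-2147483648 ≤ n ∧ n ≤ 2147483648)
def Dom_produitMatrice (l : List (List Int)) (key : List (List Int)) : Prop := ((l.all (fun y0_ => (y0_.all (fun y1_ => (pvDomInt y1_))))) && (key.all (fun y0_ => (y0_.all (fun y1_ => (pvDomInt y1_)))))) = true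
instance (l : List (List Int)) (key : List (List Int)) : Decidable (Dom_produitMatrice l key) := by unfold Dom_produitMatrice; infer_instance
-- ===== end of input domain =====

-- B replaces A's per-entry dot products plus a second zero-masking mutation pass by a
-- transpose of key and an axpy-style accumulation of key's columns per row; objective:
-- alternative (same cost, different traversal, no mutation pass).

-- inner dot product sum_{k<m} key[j][k]*md[k]; A's innermost loop
def pvDot (key : List (List Int)) (md : List Int) (m : Nat) (j : Nat) : Int :=
  (List.range m).foldl (fun md1 k => md1 + (key.getD j []).getD k 0 * md.getD k 0) 0

-- ===== PORT A =====
-- phase 1: newm built row by row by appending; phase 2: in-place zeroing newm[i][j] := 0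
def produitMatrice (l : List (List Int)) (key : List (List Int)) : List (List Int) :=
  (List.range l.length).foldl (fun newm i =>
    (List.range key.length).foldl (fun newm j =>
      if (l.getD i []).getD j 0 == 0 then newm.set i ((newm.getD i []).set j 0) else newm)
      newm)
    ((List.range l.length).foldl (fun newm i =>
      newm ++ [(List.range key.length).foldl
        (fun md2 j => md2 ++ [pvDot key (l.getD i []) key.length j]) []]) [])

-- ===== PORT B =====
-- transpose key once, then per row accumulate acc += row[k] * cols[k] (skipping zero
-- coefficients) and emit the masked row directly
def produitMatrice_alt (l : List (List Int)) (key : List (List Int)) : List (List Int) :=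
  if l = [] then []
  else
    let m := key.length
    let cols := (List.range m).map (fun k => (List.range m).map (fun j => (key.getD j []).getD k 0))
    l.map (fun row =>
      let acc := (List.range m).foldl (fun acc k =>
        if row.getD k 0 ≠ 0 then
          (List.range m).foldl (fun a j => a.set j (a.getD j 0 + row.getD k 0 * (cols.getD k []).getD j 0)) acc
        else acc) (List.replicate m 0)
      (List.range m).map (fun j => if row.getD j 0 == 0 then 0 else acc.getD j 0))

-- ===== PRECONDITION & SPEC =====
-- Pre_ excludes exactly the inputs on which Python A raises IndexError:
-- l non-empty while some row (of l or of key) is shorter than len(key).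
def Pre_produitMatrice (l : List (List Int)) (key : List (List Int)) : Prop :=
  l = [] ∨ ((∀ r ∈ key, key.length ≤ r.length) ∧ (∀ r ∈ l, key.length ≤ r.length))
instance (l : List (List Int)) (key : List (List Int)) : Decidable (Pre_produitMatrice l key) := by unfold Pre_produitMatrice; infer_instance

def pvWitness_produitMatrice : List (List Int) × List (List Int) :=
  ([[1, 2], [0, 3]], [[1, 0], [1, 1]])

def Spec_produitMatrice (l : List (List Int)) (key : List (List Int)) (out : List (List Int)) : Prop := out = produitMatrice_alt l key
instance (l : List (List Int)) (key : List (List Int)) (out : List (List Int)) : Decidable (Spec_produitMatrice l key out) := by unfold Spec_produitMatrice; infer_instance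

-- ===== CLAIM (what is proved, stated in full; the proofs are below) =====
def Claim_equal_produitMatrice : Prop := ∀ (l : List (List Int)) (key : List (List Int)), Dom_produitMatrice l key → Pre_produitMatrice l key → Spec_produitMatrice l key (produitMatrice l key)

-- ===== LEMMAS AND PROOFS =====

-- appending foldl is map
theorem pv_foldl_append {α β : Type} (f : β → α) :
    ∀ (xs : List β) (acc : List α), xs.foldl (fun a x => a ++ [f x]) acc = acc ++ xs.map f := by
  intro xs
  induction xs with
  | nil => simp
  | cons x xs ih => intro acc; simp [List.foldl_cons, ih]

-- setting back the element just read is a no-op (also when out of range)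
theorem pv_set_getD_self {α : Type} (xs : List α) (j : Nat) (d : α) :
    xs.set j (xs.getD j d) = xs := by
  rcases Nat.lt_or_ge j xs.length with h | h
  · rw [List.getD_eq_getElem xs d h]; exact List.set_getElem_self h
  · exact List.set_eq_of_length_le h

-- a foldl over range n whose step replaces index i by u i (current value) is a mapIdx
theorem pv_foldl_range_set {α : Type} (d : α) (u : Nat → α → α) :
    ∀ (n : Nat) (start : List α),
      (List.range n).foldl (fun acc i => acc.set i (u i (acc.getD i d))) start
        = List.mapIdx (fun i x => if i < n then u i x else x) start := by
  intro n
  induction n with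
  | zero =>
      intro start
      simp only [List.range_zero, List.foldl_nil]
      apply List.ext_getElem <;> simp
  | succ n ih =>
      intro start
      rw [List.range_succ, List.foldl_append, ih]
      simp only [List.foldl_cons, List.foldl_nil]
      rcases Nat.lt_or_ge n start.length with h | h
      · have hget : (List.mapIdx (fun i x => if i < n then u i x else x) start).getD n d
            = start[n] := by
          rw [List.getD_eq_getElem _ d (by simpa using h)]
          simp
        rw [hget]
        apply List.ext_getElem
        · simp
        · intro i hi _
          have hil : i < start.length := by simpa using hi
          by_cases hin : i = n
          · subst hin
            simp [List.getElem_mapIdx]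
          · simp only [List.getElem_set, List.getElem_mapIdx]
            split_ifs <;> first | rfl | omega
      · rw [List.set_eq_of_length_le (show (List.mapIdx (fun i x => if i < n then u i x else x) start).length ≤ n by simpa using h)]
        apply List.ext_getElem
        · simp
        · intro i hi _
          have hil : i < start.length := by simpa using hi
          simp only [List.getElem_mapIdx]
          split_ifs <;> first | rfl | omega

-- reading back an element just written
theorem pv_getD_set_self {α : Type} (xs : List α) (i : Nat) (v d : α) (h : i < xs.length) :
    (xs.set i v).getD i d = v := by
  rw [List.getD_eq_getElem _ d (by simpa using h)]
  exact List.getElem_set_self (by simpa using h)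

-- the inner masking loop over j, at a fixed row index i, only rewrites row i
theorem pv_inner_mask (cond : Nat → Bool) :
    ∀ (js : List Nat) (acc : List (List Int)) (i : Nat), i < acc.length →
      js.foldl (fun a j => if cond j then a.set i ((a.getD i []).set j 0) else a) acc
        = acc.set i (js.foldl (fun r j => if cond j then r.set j 0 else r) (acc.getD i [])) := by
  intro js
  induction js with
  | nil => intro acc i h; exact (pv_set_getD_self acc i []).symm
  | cons j js ih =>
      intro acc i h
      simp only [List.foldl_cons]
      by_cases hc : cond j
      · simp only [hc, if_true]
        rw [ih _ i (by simpa using h)]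
        rw [pv_getD_set_self _ _ _ _ h, List.set_set]
      · simp only [hc]
        exact ih _ i h

-- foldl respects an invariant-conditional pointwise equality of step functions
theorem pv_foldl_congr_inv {α β : Type} (P : α → Prop) (f g : α → β → α) :
    ∀ (xs : List β) (a : α), P a → (∀ a b, P a → b ∈ xs → f a b = g a b ∧ P (f a b)) →
      xs.foldl f a = xs.foldl g a := by
  intro xs
  induction xs with
  | nil => intro a _ _; rfl
  | cons b xs ih =>
      intro a ha hstep
      obtain ⟨heq, hP⟩ := hstep a b ha (List.mem_cons_self)
      have hP' : P (g a b) := heq ▸ hP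
      rw [List.foldl_cons, List.foldl_cons, heq]
      exact ih (g a b) hP' (fun a' b' ha' hb' => hstep a' b' ha' (List.mem_cons_of_mem _ hb'))

-- a foldl of length-preserving steps preserves length
theorem pv_foldl_len {α β : Type} (step : List α → β → List α)
    (h : ∀ a b, (step a b).length = a.length) :
    ∀ (xs : List β) (a : List α), (xs.foldl step a).length = a.length := by
  intro xs
  induction xs with
  | nil => intro a; rfl
  | cons b xs ih => intro a; rw [List.foldl_cons, ih, h]

-- mapping over range (length xs) with getD is mapping over xs
theorem pv_map_range_getD {α β : Type} (xs : List α) (d : α) (f : α → β) :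
    (List.range xs.length).map (fun i => f (xs.getD i d)) = xs.map f := by
  apply List.ext_getElem
  · simp
  · intro i h1 h2
    simp only [List.getElem_map, List.getElem_range]
    rw [List.getD_eq_getElem _ _ (by simpa using h1)]

-- one row: the masking loop applied to the product row gives the fused row
theorem pv_mask_row (key : List (List Int)) (md : List Int) :
    (List.range key.length).foldl
        (fun r j => if md.getD j 0 == 0 then r.set j 0 else r)
        ((List.range key.length).map (pvDot key md key.length))
      = (List.range key.length).map
          (fun j => if md.getD j 0 == 0 then 0 else pvDot key md key.length j) := by
  have hfun : (fun (r : List Int) (j : Nat) => if md.getD j 0 == 0 then r.set j 0 else r)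
      = fun r j => r.set j ((fun j x => if md.getD j 0 == 0 then 0 else x) j (r.getD j 0)) := by
    funext r j
    by_cases hc : (md.getD j 0 == 0) = true
    · simp only [hc, if_true]
    · simp only [hc]
      exact (pv_set_getD_self r j 0).symm
  rw [hfun, pv_foldl_range_set (0 : Int) (fun j x => if md.getD j 0 == 0 then 0 else x) key.length]
  apply List.ext_getElem
  · simp
  · intro i h1 h2
    have him : i < key.length := by simpa using h1
    simp [List.getElem_mapIdx, him]

-- A equals the fused per-row form (mask folded into the product)
theorem pv_A_fused (l key : List (List Int)) :
    produitMatrice l key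
      = l.map (fun row => (List.range key.length).map
          (fun j => if row.getD j 0 == 0 then 0 else pvDot key row key.length j)) := by
  unfold produitMatrice
  rw [pv_foldl_append]
  simp only [List.nil_append]
  have h1 : ((List.range l.length).map fun i =>
        (List.range key.length).foldl
          (fun md2 j => md2 ++ [pvDot key (l.getD i []) key.length j]) [])
      = (List.range l.length).map fun i =>
          (List.range key.length).map (pvDot key (l.getD i []) key.length) := by
    apply List.map_congr_left
    intro i _
    rw [pv_foldl_append]
    simp
  rw [h1]
  set newm1 := (List.range l.length).map fun i =>
      (List.range key.length).map (pvDot key (l.getD i []) key.length) with hnewm1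
  have hlen1 : newm1.length = l.length := by simp [hnewm1]
  have h2 : (List.range l.length).foldl (fun newm i =>
        (List.range key.length).foldl
          (fun newm j => if (l.getD i []).getD j 0 == 0 then
              newm.set i ((newm.getD i []).set j 0) else newm) newm) newm1
      = (List.range l.length).foldl (fun acc i =>
          acc.set i ((List.range key.length).foldl
            (fun r j => if (l.getD i []).getD j 0 == 0 then r.set j 0 else r)
            (acc.getD i []))) newm1 := by
    apply pv_foldl_congr_inv (fun a => a.length = l.length)
    · exact hlen1
    · intro a i ha hi
      have hip : i < l.length := by simpa using hi
      refine ⟨pv_inner_mask (fun j => (l.getD i []).getD j 0 == 0) (List.range key.length) a i (by omega), ?_⟩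
      have hpres : ∀ (a : List (List Int)) (j : Nat),
          (if (l.getD i []).getD j 0 == 0 then a.set i ((a.getD i []).set j 0) else a).length
            = a.length := by
        intro a j; split_ifs <;> simp
      have hlen := pv_foldl_len
        (fun (a : List (List Int)) (j : Nat) =>
          if (l.getD i []).getD j 0 == 0 then a.set i ((a.getD i []).set j 0) else a)
        hpres (List.range key.length) a
      rw [hlen]; exact ha
  rw [h2, pv_foldl_range_set ([] : List Int)
    (fun i row => (List.range key.length).foldl
      (fun r j => if (l.getD i []).getD j 0 == 0 then r.set j 0 else r) row) l.length newm1]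
  have h3 : List.mapIdx (fun i x => if i < l.length then
        (List.range key.length).foldl
          (fun r j => if (l.getD i []).getD j 0 == 0 then r.set j 0 else r) x else x) newm1
      = (List.range l.length).map fun i =>
          (List.range key.length).map
            (fun j => if (l.getD i []).getD j 0 == 0 then 0 else pvDot key (l.getD i []) key.length j) := by
    apply List.ext_getElem
    · simp [hlen1]
    · intro i h1' h2'
      have hip : i < l.length := by
        have := h1'; simp [hlen1] at this; simpa using this
      simp only [List.getElem_mapIdx, List.getElem_map, List.getElem_range, hip, if_true]
      have hval : newm1[i] = (List.range key.length).map (pvDot key (l.getD i []) key.length) := by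
        simp [hnewm1]
      rw [hval, pv_mask_row]
  rw [h3, pv_map_range_getD l [] (fun row => (List.range key.length).map
      (fun j => if row.getD j 0 == 0 then 0 else pvDot key row key.length j))]

-- B-side: one axpy step adds row[k]*cols[k][j] to every entry j < m (and 0 when skipped)
theorem pv_axpy_step (m : Nat) (row : List Int) (cols : List (List Int)) (k : Nat)
    (acc : List Int) (hlen : acc.length = m) :
    (if row.getD k 0 ≠ 0 then
       (List.range m).foldl (fun a j => a.set j (a.getD j 0 + row.getD k 0 * (cols.getD k []).getD j 0)) acc
     else acc).length = m
    ∧ ∀ j < m,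
      (if row.getD k 0 ≠ 0 then
         (List.range m).foldl (fun a j => a.set j (a.getD j 0 + row.getD k 0 * (cols.getD k []).getD j 0)) acc
       else acc).getD j 0
        = acc.getD j 0 + row.getD k 0 * (cols.getD k []).getD j 0 := by
  by_cases hc : row.getD k 0 = 0
  · rw [if_neg (by simpa using hc)]
    exact ⟨hlen, fun j _ => by rw [hc]; ring⟩
  · rw [if_pos hc,
      pv_foldl_range_set (0 : Int) (fun j x => x + row.getD k 0 * (cols.getD k []).getD j 0) m acc]
    constructor
    · simp [hlen]
    · intro j hj
      have hj' : j < acc.length := by omega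
      rw [List.getD_eq_getElem _ _ (by simpa using hj'), List.getD_eq_getElem _ _ hj']
      simp [hj]

-- B-side: the accumulation loop sums the per-column contributions entrywise
theorem pv_axpy_fold (m : Nat) (row : List Int) (cols : List (List Int)) :
    ∀ (ks : List Nat) (acc : List Int), acc.length = m →
      (ks.foldl (fun acc k =>
          if row.getD k 0 ≠ 0 then
            (List.range m).foldl (fun a j => a.set j (a.getD j 0 + row.getD k 0 * (cols.getD k []).getD j 0)) acc
          else acc) acc).length = m
      ∧ ∀ j < m,
        (ks.foldl (fun acc k =>
            if row.getD k 0 ≠ 0 then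
              (List.range m).foldl (fun a j => a.set j (a.getD j 0 + row.getD k 0 * (cols.getD k []).getD j 0)) acc
            else acc) acc).getD j 0
          = acc.getD j 0 + (ks.map (fun k => row.getD k 0 * (cols.getD k []).getD j 0)).sum := by
  intro ks
  induction ks with
  | nil => intro acc h; exact ⟨h, fun j _ => by simp⟩
  | cons k ks ih =>
      intro acc h
      obtain ⟨hslen, hsget⟩ := pv_axpy_step m row cols k acc h
      obtain ⟨hflen, hfget⟩ := ih _ hslen
      refine ⟨by simpa using hflen, fun j hj => ?_⟩
      simp only [List.foldl_cons, List.map_cons, List.sum_cons]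
      rw [hfget j hj, hsget j hj]
      ring

-- B equals the same fused per-row form
theorem pv_B_fused (l key : List (List Int)) :
    produitMatrice_alt l key
      = l.map (fun row => (List.range key.length).map
          (fun j => if row.getD j 0 == 0 then 0 else pvDot key row key.length j)) := by
  unfold produitMatrice_alt
  by_cases hl : l = []
  · simp [hl]
  · simp only [hl, if_false]
    apply List.map_congr_left
    intro row _
    set m := key.length with hm
    set cols := (List.range m).map (fun k => (List.range m).map (fun j => (key.getD j []).getD k 0)) with hcols
    obtain ⟨_, hget⟩ := pv_axpy_fold m row cols (List.range m) (List.replicate m 0) (by simp)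
    apply List.map_congr_left
    intro j hj
    have hjm : j < m := by simpa using hj
    -- the accumulated entry equals A's dot product (whether masked or not)
    have hacc : ((List.range m).foldl (fun acc k =>
          if row.getD k 0 ≠ 0 then
            (List.range m).foldl (fun a j => a.set j (a.getD j 0 + row.getD k 0 * (cols.getD k []).getD j 0)) acc
          else acc) (List.replicate m 0)).getD j 0 = pvDot key row m j := by
      rw [hget j hjm]
      have hrepl : (List.replicate m (0 : Int)).getD j 0 = 0 := by
        rw [List.getD_eq_getElem _ _ (by simpa using hjm)]; simp
      rw [hrepl, zero_add]
      have hterm : (List.range m).map (fun k => row.getD k 0 * (cols.getD k []).getD j 0)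
          = (List.range m).map (fun k => (key.getD j []).getD k 0 * row.getD k 0) := by
        apply List.map_congr_left
        intro k hk'
        have hkm : k < m := by simpa using hk'
        have hcol : cols.getD k [] = (List.range m).map (fun j => (key.getD j []).getD k 0) := by
          rw [hcols, List.getD_eq_getElem _ _ (by simpa using hkm)]
          simp
        have hcj : (cols.getD k []).getD j 0 = (key.getD j []).getD k 0 := by
          rw [hcol, List.getD_eq_getElem _ _ (by simpa using hjm)]
          simp
        rw [hcj]; ring
      rw [hterm]
      unfold pvDot
      rw [PySem.List.foldl_add (g := fun k => (key.getD j []).getD k 0 * row.getD k 0)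
        (l := List.range m) (a := 0)]
      rw [zero_add]
    rw [hacc]

-- ===== VERDICT (by name: the statement is the Claim_ definition above) =====
theorem produitMatrice_spec : Claim_equal_produitMatrice := by
  intro l key _ _
  unfold Spec_produitMatrice
  rw [pv_A_fused, pv_B_fused]
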